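-- pv_equiv track=rewrite | github.com/DurivetMatthias/advent-of-code-pyhton | 2024_day_04_star_1.py | rotate_grid_diagonal
-- ===== SOURCE A (Python) =====
-- def rotate_grid_diagonal(grid):
--     diagonal = []
--     height = len(grid)
--     width = max([len(row) for row in grid])
--     new_height = width + height - 1
--     new_width = width
--     for row_index in range(new_height):
--         row = ""
--         for col_index in range(new_width):
--             if row_index - col_index >= 0 and row_index - col_index < height:
--                 row += grid[row_index - col_index][col_index]
--         diagonal.append(row)
--     return diagonal
-- ===== SOURCE B (Python) =====
-- def rotate_grid_diagonal(grid):
--     height = len(grid)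
--     width = max(len(row) for row in grid)
--     buckets = [""] * (width + height - 1)
--     for col in range(width):
--         for row in range(height):
--             buckets[row + col] += grid[row][col]
--     return buckets
-- ===== Notes on version B (the rewrite author's own statement) =====
-- stated objective: faster
-- what changed: Instead of scanning every column for each of the width+height-1 output rows with an in-range guard, B makes a single pass over the grid cells in column order and appends each grid[row][col] to bucket row+col.
import Mathlib
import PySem

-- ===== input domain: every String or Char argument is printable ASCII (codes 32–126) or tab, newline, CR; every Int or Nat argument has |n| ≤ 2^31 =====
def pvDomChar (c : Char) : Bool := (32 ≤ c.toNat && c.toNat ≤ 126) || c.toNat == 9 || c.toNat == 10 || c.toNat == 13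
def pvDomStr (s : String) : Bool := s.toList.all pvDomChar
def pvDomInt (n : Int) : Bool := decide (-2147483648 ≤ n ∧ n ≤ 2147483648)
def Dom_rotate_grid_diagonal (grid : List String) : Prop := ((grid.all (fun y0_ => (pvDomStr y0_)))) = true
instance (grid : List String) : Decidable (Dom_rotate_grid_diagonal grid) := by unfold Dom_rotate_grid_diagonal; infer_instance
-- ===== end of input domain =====

-- B replaces A's scan of every column for each of the width+height-1 output rows by a single
-- pass over the grid cells in column order, appending grid[row][col] to bucket row+col (faster).

-- grid[i][j] as the one-character string Python appends, as a List Char (row strings are built on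
-- the List Char side, exact on the ASCII domain); [] only where Python would raise IndexError,
-- which Pre_ excludes.
def pvCharAt (grid : List String) (i j : Int) : List Char :=
  ((PySem.List.pyGet? grid i).bind (fun r => PySem.List.pyGet? r.toList j)).elim [] (fun c => [c])

-- ===== PORT A =====
def rotate_grid_diagonal (grid : List String) : List String :=
  let height : Int := PySem.List.len grid
  let width : Int := ((PySem.List.max? (grid.map (fun row => PySem.Str.len row)) (fun x => x)).getD 0)
  let new_height : Int := width + height - 1
  let new_width : Int := width
  (PySem.List.pyRange 0 new_height 1).foldl (fun diagonal row_index =>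
    let row : List Char :=
      (PySem.List.pyRange 0 new_width 1).foldl (fun row col_index =>
        if row_index - col_index ≥ 0 ∧ row_index - col_index < height then
          row ++ pvCharAt grid (row_index - col_index) col_index
        else row) []
    diagonal ++ [String.ofList row]) []

-- ===== PORT B =====
def rotate_grid_diagonal_alt (grid : List String) : List String :=
  let height : Int := PySem.List.len grid
  let width : Int := ((PySem.List.max? (grid.map (fun row => PySem.Str.len row)) (fun x => x)).getD 0)
  let buckets : List (List Char) := List.replicate (width + height - 1).toNat []
  ((PySem.List.pyRange 0 width 1).foldl (fun bs col =>
      (PySem.List.pyRange 0 height 1).foldl (fun bs row =>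
        bs.modify (row + col).toNat (fun s => s ++ pvCharAt grid row col)) bs) buckets).map String.ofList

-- ===== PRECONDITION & SPEC =====
-- Pre_ excludes exactly the inputs on which Python A raises: the empty grid (max() of an empty
-- sequence, ValueError) and ragged grids (grid[r][c] on a row shorter than the widest, IndexError).
def Pre_rotate_grid_diagonal (grid : List String) : Prop :=
  grid ≠ [] ∧ ∀ s ∈ grid, ∀ t ∈ grid, s.toList.length = t.toList.length
instance (grid : List String) : Decidable (Pre_rotate_grid_diagonal grid) := by
  unfold Pre_rotate_grid_diagonal; infer_instance
def pvWitness_rotate_grid_diagonal : List String := ["abc", "def"]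

def Spec_rotate_grid_diagonal (grid : List String) (out : List String) : Prop := out = rotate_grid_diagonal_alt grid
instance (grid : List String) (out : List String) : Decidable (Spec_rotate_grid_diagonal grid out) := by unfold Spec_rotate_grid_diagonal; infer_instance

-- ===== CLAIM (what is proved, stated in full; the proofs are below) =====
def Claim_equal_rotate_grid_diagonal : Prop := ∀ (grid : List String), Dom_rotate_grid_diagonal grid → Pre_rotate_grid_diagonal grid → Spec_rotate_grid_diagonal grid (rotate_grid_diagonal grid)

-- ===== LEMMAS AND PROOFS =====

-- the characters of diagonal d after the first k columns have been looked at
def pvDiagStr (grid : List String) (h d k : Nat) : List Char :=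
  (List.range k).foldl
    (fun s c => if c ≤ d ∧ d - c < h then s ++ pvCharAt grid ((d - c : Nat) : Int) (c : Int) else s) []

-- B's inner loop over the rows of one column c
def pvInner (grid : List String) (c h : Nat) (bs : List (List Char)) : List (List Char) :=
  (List.range h).foldl (fun bs i => bs.modify (i + c) (fun s => s ++ pvCharAt grid (i : Int) (c : Int))) bs

lemma pvDiagStr_succ (grid : List String) (h d k : Nat) :
    pvDiagStr grid h d (k + 1) =
      if k ≤ d ∧ d - k < h then pvDiagStr grid h d k ++ pvCharAt grid ((d - k : Nat) : Int) (k : Int)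
      else pvDiagStr grid h d k := by
  unfold pvDiagStr
  rw [List.range_succ, List.foldl_append]
  simp

lemma pvInner_getElem? (grid : List String) (c h : Nat) (bs : List (List Char)) (d : Nat) :
    (pvInner grid c h bs)[d]? =
      if c ≤ d ∧ d - c < h then
        (fun s => s ++ pvCharAt grid ((d - c : Nat) : Int) (c : Int)) <$> bs[d]?
      else bs[d]? := by
  induction h with
  | zero =>
    have h0 : ¬ (c ≤ d ∧ d - c < 0) := by omega
    simp [pvInner]
  | succ h ih =>
    have hstep : pvInner grid c (h + 1) bs = (pvInner grid c h bs).modify (h + c)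
        (fun s => s ++ pvCharAt grid (h : Int) (c : Int)) := by
      unfold pvInner
      rw [List.range_succ, List.foldl_append]
      simp
    rw [hstep, List.getElem?_modify]
    by_cases he : h + c = d
    · have h1 : c ≤ d ∧ d - c < h + 1 := by omega
      have h2 : ¬ (c ≤ d ∧ d - c < h) := by omega
      have h3 : d - c = h := by omega
      simp [he, ih, h1, h3]
    · by_cases h2 : c ≤ d ∧ d - c < h
      · have h1 : c ≤ d ∧ d - c < h + 1 := by omega
        simp [he, ih, h1, h2]
      · have h1 : ¬ (c ≤ d ∧ d - c < h + 1) := by omega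
        simp only [he, if_false, ih, if_neg h2, if_neg h1]
        simp

lemma pvOuter_getElem? (grid : List String) (h nh : Nat) (k : Nat) (d : Nat) :
    ((List.range k).foldl (fun bs c => pvInner grid c h bs) (List.replicate nh ([] : List Char)))[d]? =
      if d < nh then some (pvDiagStr grid h d k) else none := by
  induction k with
  | zero =>
    simp [pvDiagStr, List.getElem?_replicate]
  | succ k ih =>
    rw [List.range_succ, List.foldl_append]
    simp only [List.foldl_cons, List.foldl_nil]
    rw [pvInner_getElem?, ih, pvDiagStr_succ]
    by_cases hg : k ≤ d ∧ d - k < h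
    · by_cases hd : d < nh <;> simp [hg, hd]
    · simp [hg]

-- A's row for diagonal d equals pvDiagStr grid h d w (Int loop → Nat loop)
lemma pvRowA_eq (grid : List String) (h w d : Nat) :
    (PySem.List.pyRange 0 (w : Int) 1).foldl (fun row col_index =>
        if (d : Int) - col_index ≥ 0 ∧ (d : Int) - col_index < (h : Int) then
          row ++ pvCharAt grid ((d : Int) - col_index) col_index
        else row) [] = pvDiagStr grid h d w := by
  rw [PySem.List.pyRange_zero_nat, List.foldl_map]
  unfold pvDiagStr
  apply PySem.List.foldl_congr_mem
  intro s c _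
  by_cases h1 : c ≤ d
  · have hc : (d : Int) - (c : Int) = ((d - c : Nat) : Int) := by omega
    by_cases h2 : d - c < h
    · have hg : (d : Int) - (c : Int) ≥ 0 ∧ (d : Int) - (c : Int) < (h : Int) := by omega
      rw [if_pos hg, if_pos ⟨h1, h2⟩, hc]
    · have hg : ¬ ((d : Int) - (c : Int) ≥ 0 ∧ (d : Int) - (c : Int) < (h : Int)) := by omega
      rw [if_neg hg, if_neg (by omega : ¬ (c ≤ d ∧ d - c < h))]
  · have hg : ¬ ((d : Int) - (c : Int) ≥ 0 ∧ (d : Int) - (c : Int) < (h : Int)) := by omega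
    rw [if_neg hg, if_neg (by omega : ¬ (c ≤ d ∧ d - c < h))]

lemma pvWidth_nonneg (grid : List String) :
    0 ≤ ((PySem.List.max? (grid.map (fun row => PySem.Str.len row)) (fun x => x)).getD 0) := by
  cases hm : PySem.List.max? (grid.map (fun row => PySem.Str.len row)) (fun x => x) with
  | none => simp
  | some m =>
    have := PySem.List.max?_mem hm
    simp only [List.mem_map] at this
    obtain ⟨s, _, hs⟩ := this
    simp only [Option.getD_some]
    rw [← hs]
    simp [PySem.Str.len_eq]

-- A in closed form
lemma pvA_eq (grid : List String) (hne : grid ≠ []) :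
    rotate_grid_diagonal grid =
      (List.range ((((PySem.List.max? (grid.map (fun row => PySem.Str.len row)) (fun x => x)).getD 0).toNat)
                    + grid.length - 1)).map
        (fun d => String.ofList (pvDiagStr grid grid.length d
          (((PySem.List.max? (grid.map (fun row => PySem.Str.len row)) (fun x => x)).getD 0).toNat))) := by
  have hw := pvWidth_nonneg grid
  set wI := (PySem.List.max? (grid.map (fun row => PySem.Str.len row)) (fun x => x)).getD 0 with hwI
  have hh : 1 ≤ grid.length := List.length_pos_iff.mpr hne
  have hnh : wI + (PySem.List.len grid) - 1 = ((wI.toNat + grid.length - 1 : Nat) : Int) := by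
    simp only [PySem.List.len_eq]
    omega
  unfold rotate_grid_diagonal
  simp only [← hwI, hnh]
  rw [PySem.List.pyRange_zero_nat, List.foldl_map,
      PySem.List.foldl_append_singleton_eq_map]
  simp only [List.nil_append]
  apply List.map_congr_left
  intro d _
  congr 1
  have hwN : wI = ((wI.toNat : Nat) : Int) := by omega
  rw [hwN]
  simp only [PySem.List.len_eq, Int.toNat_natCast]
  exact pvRowA_eq grid grid.length wI.toNat d

-- B in closed form
lemma pvB_eq (grid : List String) (hne : grid ≠ []) :
    rotate_grid_diagonal_alt grid =
      (List.range ((((PySem.List.max? (grid.map (fun row => PySem.Str.len row)) (fun x => x)).getD 0).toNat)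
                    + grid.length - 1)).map
        (fun d => String.ofList (pvDiagStr grid grid.length d
          (((PySem.List.max? (grid.map (fun row => PySem.Str.len row)) (fun x => x)).getD 0).toNat))) := by
  have hw := pvWidth_nonneg grid
  set wI := (PySem.List.max? (grid.map (fun row => PySem.Str.len row)) (fun x => x)).getD 0 with hwI
  have hh : 1 ≤ grid.length := List.length_pos_iff.mpr hne
  set W : Nat := wI.toNat with hWdef
  set NH : Nat := W + grid.length - 1 with hNH
  have hnh : (wI + (PySem.List.len grid) - 1).toNat = NH := by
    simp only [PySem.List.len_eq]
    omega
  unfold rotate_grid_diagonal_alt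
  simp only [← hwI, hnh]
  have hwN : wI = ((W : Nat) : Int) := by omega
  have hfold : (PySem.List.pyRange 0 wI 1).foldl (fun bs col =>
      (PySem.List.pyRange 0 (PySem.List.len grid) 1).foldl (fun bs row =>
        bs.modify (row + col).toNat (fun s => s ++ pvCharAt grid row col)) bs)
      (List.replicate NH ([] : List Char)) =
      (List.range W).foldl (fun bs c => pvInner grid c grid.length bs)
        (List.replicate NH ([] : List Char)) := by
    rw [hwN, PySem.List.pyRange_zero_nat, List.foldl_map]
    apply PySem.List.foldl_congr_mem
    intro bs c _
    simp only [PySem.List.len_eq]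
    rw [PySem.List.pyRange_zero_nat, List.foldl_map]
    unfold pvInner
    apply PySem.List.foldl_congr_mem
    intro bs' i _
    have : ((i : Int) + (c : Int)).toNat = i + c := by omega
    rw [this]
  rw [hfold]
  apply List.ext_getElem?
  intro d
  rw [List.getElem?_map, pvOuter_getElem? grid grid.length NH W d]
  by_cases hd : d < NH
  · simp [hd]
  · simp [hd]

-- ===== VERDICT (by name: the statement is the Claim_ definition above) =====
theorem rotate_grid_diagonal_spec : Claim_equal_rotate_grid_diagonal := by
  intro grid _ hpre
  unfold Spec_rotate_grid_diagonal
  rw [pvA_eq grid hpre.1, pvB_eq grid hpre.1]
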